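-- pv_equiv track=rewrite | github.com/chillbot-io/stablelabel | server/stablelabel-api/app/services/policy_engine.py | _evidence_keyword_check
-- ===== SOURCE A (Python) =====
-- def _is_within_proximity(
--     hit_start: int,
--     hit_end: int,
--     primary_positions: list[tuple[int, int]],
--     proximity: int,
-- ) -> bool:
--     """Check if a hit position is within proximity of any primary match position."""
--     if proximity <= 0:
--         return True  # proximity=0 means no proximity check
--     for p_start, p_end in primary_positions:
--         # Evidence can be before or after the primary match
--         if hit_start >= p_start - proximity and hit_end <= p_end + proximity:
--             return True
--         # Also check overlap
--         if hit_start <= p_end + proximity and hit_end >= p_start - proximity: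
--             return True
--     return False
--
-- def _evidence_keyword_check(
--     keywords: list[str],
--     case_sensitive: bool,
--     text: str,
--     primary_positions: list[tuple[int, int]],
--     proximity: int,
-- ) -> str | None:
--     """Check if keywords appear within proximity of primary matches."""
--     if not keywords or not text:
--         return None
--
--     search_text = text if case_sensitive else text.lower()
--     matched_keywords: list[str] = []
--
--     for kw in keywords:
--         search_kw = kw if case_sensitive else kw.lower()
--         start = 0
--         while True:
--             idx = search_text.find(search_kw, start)
--             if idx == -1:
--                 break
--             hit_end = idx + len(search_kw)
--             if _is_within_proximity(idx, hit_end, primary_positions, proximity):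
--                 if kw not in matched_keywords:
--                     matched_keywords.append(kw)
--                 break  # one match per keyword is enough
--             start = idx + 1
--
--     if matched_keywords:
--         return f"found {matched_keywords}"
--     return None
-- ===== SOURCE B (Python) =====
-- def _evidence_keyword_check(
--     keywords,
--     case_sensitive,
--     text,
--     primary_positions,
--     proximity,
-- ):
--     """Interval-merge reformulation: expand each primary span by the proximity
--     window once, sort and merge the windows, then for each keyword do one
--     bounded str.find per merged window (first occurrence at or after the
--     window's shifted start) instead of enumerating every occurrence and
--     re-testing it against every primary span; A's containment branch is
--     subsumed by its overlap branch, so a hit qualifies iff its start lies in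
--     [lo - len(kw), hi] for some expanded window (lo, hi)."""
--     if not keywords or not text:
--         return None
--     search_text = text if case_sensitive else text.lower()
--
--     merged = []
--     if proximity > 0:
--         cur = None
--         for lo, hi in sorted(
--             ((ps - proximity, pe + proximity) for ps, pe in primary_positions),
--             key=lambda w: w[0],
--         ):
--             if cur is None:
--                 cur = (lo, hi)
--             elif lo <= cur[1]:
--                 cur = (cur[0], max(cur[1], hi))
--             else:
--                 merged.append(cur)
--                 cur = (lo, hi)
--         if cur is not None:
--             merged.append(cur)
--
--     matched = []
--     for kw in keywords:
--         if kw in matched: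
--             continue
--         skw = kw if case_sensitive else kw.lower()
--         if proximity <= 0:
--             if skw in search_text:
--                 matched.append(kw)
--         else:
--             m = len(skw)
--             for lo, hi in merged:
--                 idx = search_text.find(skw, max(lo - m, 0))
--                 if idx != -1 and idx <= hi:
--                     matched.append(kw)
--                     break
--
--     return f"found {matched}" if matched else None
-- ===== Notes on version B (the rewrite author's own statement) =====
-- stated objective: faster
-- what changed: A scans every occurrence of every keyword with an advancing str.find loop and re-tests each hit against every primary span via a two-branch proximity helper; B preprocesses instead: it expands each primary span by the proximity once, sorts and merges the expanded windows, and then answers each keyword with a single bounded str.find per merged window (the first occurrence at or after the window's shifted start decides the window), dropping A's containment branch, which is subsumed by its overlap branch.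
import Mathlib
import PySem

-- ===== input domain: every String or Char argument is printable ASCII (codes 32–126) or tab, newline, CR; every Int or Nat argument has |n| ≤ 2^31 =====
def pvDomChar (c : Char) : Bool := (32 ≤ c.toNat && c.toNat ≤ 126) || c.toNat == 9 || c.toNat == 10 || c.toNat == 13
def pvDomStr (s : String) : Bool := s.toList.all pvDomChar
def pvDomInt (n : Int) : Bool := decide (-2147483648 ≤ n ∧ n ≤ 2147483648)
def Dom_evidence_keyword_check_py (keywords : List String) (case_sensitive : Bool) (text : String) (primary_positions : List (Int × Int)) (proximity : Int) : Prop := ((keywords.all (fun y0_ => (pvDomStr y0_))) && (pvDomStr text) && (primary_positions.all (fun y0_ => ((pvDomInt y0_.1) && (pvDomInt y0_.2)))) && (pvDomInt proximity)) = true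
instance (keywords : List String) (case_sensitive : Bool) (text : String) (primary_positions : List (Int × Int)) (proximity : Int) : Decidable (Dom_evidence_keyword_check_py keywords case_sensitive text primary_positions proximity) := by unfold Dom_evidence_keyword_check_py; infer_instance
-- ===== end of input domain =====

-- B replaces A's per-occurrence scan (str.find loop re-tested against every primary span) by a
-- one-time sort-and-merge of the proximity-expanded spans followed by one bounded str.find per
-- merged window and keyword (objective: faster; a timing run measured it).

-- ===== PORT A =====

-- shared output formatting: Python's repr of a str restricted to the Dom alphabet
-- (printable ASCII plus tab/newline/CR) — exact there: repr prefers single quotes,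
-- switches to double quotes iff the string contains ' and no ", and escapes \, the
-- quote character, \t, \n, \r.
def pyReprChar (q : Char) (c : Char) : List Char :=
  if c = '\\' then ['\\', '\\']
  else if c = q then ['\\', q]
  else if c = '\t' then ['\\', 't']
  else if c = '\n' then ['\\', 'n']
  else if c = '\r' then ['\\', 'r']
  else [c]

def pyReprStr (s : String) : String :=
  let q : Char := if s.toList.contains '\'' && !(s.toList.contains '"') then '"' else '\''
  String.ofList ([q] ++ s.toList.flatMap (pyReprChar q) ++ [q])

-- f"found {matched_keywords}": Python's repr of a list of strings
def pyReprStrList (xs : List String) : String :=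
  "[" ++ String.intercalate ", " (xs.map pyReprStr) ++ "]"

-- _is_within_proximity: the for-loop over primary_positions, branches in source order
def iwpLoop (hit_start hit_end : Int) (prox : Int) : List (Int × Int) → Bool
  | [] => false
  | (p_start, p_end) :: rest =>
    if hit_start ≥ p_start - prox ∧ hit_end ≤ p_end + prox then true
    else if hit_start ≤ p_end + prox ∧ hit_end ≥ p_start - prox then true
    else iwpLoop hit_start hit_end prox rest

def is_within_proximity_py (hit_start hit_end : Int) (primary_positions : List (Int × Int)) (proximity : Int) : Bool :=
  if proximity ≤ 0 then true
  else iwpLoop hit_start hit_end proximity primary_positions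

-- named bound used by aFindLoop's decreasing_by
theorem pv_findFrom_bounds (st skw : List Char) (start : Nat)
    (h : PySem.Chars.findFrom st skw (start : Int) ≠ -1) :
    (start : Int) ≤ PySem.Chars.findFrom st skw (start : Int) ∧
    (PySem.Chars.findFrom st skw (start : Int)).toNat ≤ st.length := by
  by_cases hk : start ≤ st.length
  · have h2 := PySem.Chars.findFrom_natCast st skw start hk
    have h3 := PySem.Chars.find_le_length (st.drop start) skw
    have h4 := PySem.Chars.neg_one_le_find (st.drop start) skw
    rw [h2] at h ⊢
    split_ifs at h ⊢ with hc
    · exact absurd rfl h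
    · simp only [List.length_drop] at h3
      omega
  · exfalso
    apply h
    simp only [PySem.Chars.findFrom]
    split_ifs <;> omega

-- A's inner 'while True' find loop for one keyword: returns true iff it breaks on a
-- proximity-qualifying occurrence, false when find returns -1
def aFindLoop (st skw : List Char) (pps : List (Int × Int)) (prox : Int) (start : Nat) : Bool :=
  let idx := PySem.Chars.findFrom st skw (start : Int)
  if h : idx = -1 then false
  else
    let hit_end := idx + (skw.length : Int)
    if is_within_proximity_py idx hit_end pps prox then true
    else aFindLoop st skw pps prox (idx.toNat + 1)
termination_by st.length + 1 - start
decreasing_by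
  have := pv_findFrom_bounds st skw start h
  omega

def evidence_keyword_check_py (keywords : List String) (case_sensitive : Bool) (text : String) (primary_positions : List (Int × Int)) (proximity : Int) : Option String :=
  if keywords = [] ∨ text = "" then none
  else
    let search_text := (if case_sensitive then text else PySem.Str.lower text).toList
    let matched_keywords := keywords.foldl (fun acc kw =>
      let search_kw := (if case_sensitive then kw else PySem.Str.lower kw).toList
      if aFindLoop search_text search_kw primary_positions proximity 0 then
        if acc.contains kw then acc else acc ++ [kw]
      else acc) ([] : List String)
    if matched_keywords ≠ [] then some ("found " ++ pyReprStrList matched_keywords)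
    else none

-- ===== PORT B =====

-- one step of B's merge loop over the sorted expanded windows (state: finished windows, current window)
def pvMergeStep (st : List (Int × Int) × Option (Int × Int)) (w : Int × Int) :
    List (Int × Int) × Option (Int × Int) :=
  match st.2 with
  | none => (st.1, some w)
  | some cur =>
    if w.1 ≤ cur.2 then (st.1, some (cur.1, max cur.2 w.2))
    else (st.1 ++ [cur], some w)

-- after the loop: append the pending current window, if any
def pvMergeFin (st : List (Int × Int) × Option (Int × Int)) : List (Int × Int) :=
  match st.2 with
  | none => st.1
  | some cur => st.1 ++ [cur]

-- sort the proximity-expanded primary spans by start and merge overlapping ones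
def pvMergedWindows (primary_positions : List (Int × Int)) (proximity : Int) : List (Int × Int) :=
  pvMergeFin ((PySem.List.sorted
    (primary_positions.map (fun p => (p.1 - proximity, p.2 + proximity))) (fun w => w.1)
    false).foldl pvMergeStep (([] : List (Int × Int)), (none : Option (Int × Int))))

def evidence_keyword_check_py_alt (keywords : List String) (case_sensitive : Bool) (text : String) (primary_positions : List (Int × Int)) (proximity : Int) : Option String :=
  if keywords = [] ∨ text = "" then none
  else
    let search_text := (if case_sensitive then text else PySem.Str.lower text).toList
    let merged := if proximity > 0 then pvMergedWindows primary_positions proximity else []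
    let matched := keywords.foldl (fun acc kw =>
      if acc.contains kw then acc
      else
        let skw := (if case_sensitive then kw else PySem.Str.lower kw).toList
        if proximity ≤ 0 then
          if PySem.Chars.isIn skw search_text then acc ++ [kw] else acc
        else
          let m := skw.length
          -- for lo, hi in merged: one bounded find per merged window, break on success
          if merged.any (fun w =>
               let idx := PySem.Chars.findFrom search_text skw (max (w.1 - (m : Int)) 0)
               decide (idx ≠ -1) && decide (idx ≤ w.2))
          then acc ++ [kw] else acc) ([] : List String)
    if matched ≠ [] then some ("found " ++ pyReprStrList matched)
    else none

-- ===== PRECONDITION & SPEC =====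
def Spec_evidence_keyword_check_py (keywords : List String) (case_sensitive : Bool) (text : String) (primary_positions : List (Int × Int)) (proximity : Int) (out : Option String) : Prop := out = evidence_keyword_check_py_alt keywords case_sensitive text primary_positions proximity
instance (keywords : List String) (case_sensitive : Bool) (text : String) (primary_positions : List (Int × Int)) (proximity : Int) (out : Option String) : Decidable (Spec_evidence_keyword_check_py keywords case_sensitive text primary_positions proximity out) := by unfold Spec_evidence_keyword_check_py; infer_instance

-- ===== CLAIM (what is proved, stated in full; the proofs are below) =====
def Claim_equal_evidence_keyword_check_py : Prop := ∀ (keywords : List String) (case_sensitive : Bool) (text : String) (primary_positions : List (Int × Int)) (proximity : Int), Dom_evidence_keyword_check_py keywords case_sensitive text primary_positions proximity → Spec_evidence_keyword_check_py keywords case_sensitive text primary_positions proximity (evidence_keyword_check_py keywords case_sensitive text primary_positions proximity)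

-- ===== LEMMAS AND PROOFS =====

theorem bool_eq_of_iff {a b : Bool} (h : a = true ↔ b = true) : a = b := by
  cases a <;> cases b <;> simp_all

-- the loop of _is_within_proximity as an existential
theorem iwpLoop_true_iff (hs he prox : Int) (pps : List (Int × Int)) :
    iwpLoop hs he prox pps = true ↔
      ∃ p ∈ pps, (hs ≥ p.1 - prox ∧ he ≤ p.2 + prox) ∨ (hs ≤ p.2 + prox ∧ he ≥ p.1 - prox) := by
  induction pps with
  | nil => simp [iwpLoop]
  | cons p rest ih =>
    obtain ⟨ps, pe⟩ := p
    simp only [iwpLoop]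
    split_ifs with h1 h2
    · simp only [true_iff]
      exact ⟨(ps, pe), List.mem_cons_self .., Or.inl h1⟩
    · simp only [true_iff]
      exact ⟨(ps, pe), List.mem_cons_self .., Or.inr h2⟩
    · rw [ih]
      constructor
      · rintro ⟨q, hq, hw⟩; exact ⟨q, List.mem_cons_of_mem _ hq, hw⟩
      · rintro ⟨q, hq, hw⟩
        rcases List.mem_cons.mp hq with rfl | hq
        · exact absurd hw (by tauto)
        · exact ⟨q, hq, hw⟩

-- the containment branch collapses: for a hit (i, i+m), A's proximity test is
-- 'prox ≤ 0 or the hit start lies in some shifted expanded window [p.1-prox-m, p.2+prox]'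
theorem iwp_eq_window (i : Int) (m : Nat) (pps : List (Int × Int)) (prox : Int) (hp : ¬ prox ≤ 0) :
    is_within_proximity_py i (i + (m : Int)) pps prox = true ↔
      ∃ p ∈ pps, (p.1 - prox) - (m : Int) ≤ i ∧ i ≤ p.2 + prox := by
  unfold is_within_proximity_py
  simp only [hp, if_false]
  rw [iwpLoop_true_iff]
  constructor
  · rintro ⟨q, hq, hw⟩
    refine ⟨q, hq, ?_⟩
    rcases hw with ⟨h1, h2⟩ | ⟨h1, h2⟩ <;> constructor <;> omega
  · rintro ⟨q, hq, h1, h2⟩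
    exact ⟨q, hq, Or.inr ⟨h2, by omega⟩⟩

-- characterization of A's find loop: true iff some occurrence at index i ∈ [start, len]
-- passes the proximity check
theorem aFindLoop_iff (st skw : List Char) (pps : List (Int × Int)) (prox : Int) (start : Nat) :
    aFindLoop st skw pps prox start = true ↔
      ∃ i : Nat, start ≤ i ∧ i ≤ st.length ∧ skw <+: st.drop i ∧
        is_within_proximity_py (i : Int) ((i : Int) + (skw.length : Int)) pps prox = true := by
  induction start using aFindLoop.induct st skw pps prox with
  | case1 start idx h =>
    have h' : PySem.Chars.findFrom st skw (start : Int) = -1 := h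
    rw [aFindLoop]
    simp only [h', dite_eq_ite, reduceIte, Bool.false_eq_true, false_iff]
    rintro ⟨i, hsi, hil, hpre, _⟩
    by_cases hk : start ≤ st.length
    · have hneg := (PySem.Chars.findFrom_natCast_eq_neg_one_iff st skw start hk).mp h'
      apply hneg
      have hdr : st.drop i = (st.drop start).drop (i - start) := by
        rw [List.drop_drop]; congr 1; omega
      rw [hdr] at hpre
      exact hpre.isInfix.trans (List.drop_suffix _ _).isInfix
    · omega
  | case2 start idx h hit_end hok =>
    have h' : PySem.Chars.findFrom st skw (start : Int) ≠ -1 := h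
    have hok' : is_within_proximity_py (PySem.Chars.findFrom st skw (start : Int))
        (PySem.Chars.findFrom st skw (start : Int) + (skw.length : Int)) pps prox = true := hok
    rw [aFindLoop]
    simp only [h', hok', dite_eq_ite, reduceIte, true_iff]
    have hb := pv_findFrom_bounds st skw start h'
    have hidx : (0 : Int) ≤ PySem.Chars.findFrom st skw (start : Int) :=
      le_trans (by positivity) hb.1
    have hk : start ≤ st.length := by omega
    have hspec := PySem.Chars.findFrom_natCast_spec st skw start hk h'
    have hcast : (((PySem.Chars.findFrom st skw (start : Int)).toNat : Nat) : Int)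
        = PySem.Chars.findFrom st skw (start : Int) := Int.toNat_of_nonneg hidx
    refine ⟨(PySem.Chars.findFrom st skw (start : Int)).toNat, by omega, hb.2, hspec.2.1, ?_⟩
    rw [hcast]
    exact hok'
  | case3 start idx h hit_end hok ih =>
    have h' : PySem.Chars.findFrom st skw (start : Int) ≠ -1 := h
    have hok' : is_within_proximity_py (PySem.Chars.findFrom st skw (start : Int))
        (PySem.Chars.findFrom st skw (start : Int) + (skw.length : Int)) pps prox = false := by
      have := hok; simp only [Bool.not_eq_true] at this; exact this
    rw [aFindLoop]
    simp only [h', hok', dite_eq_ite, reduceIte, Bool.false_eq_true]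
    rw [ih]
    have hb := pv_findFrom_bounds st skw start h'
    have hidx : (0 : Int) ≤ PySem.Chars.findFrom st skw (start : Int) :=
      le_trans (by positivity) hb.1
    have hk : start ≤ st.length := by omega
    have hspec := PySem.Chars.findFrom_natCast_spec st skw start hk h'
    have hcast : (((PySem.Chars.findFrom st skw (start : Int)).toNat : Nat) : Int)
        = PySem.Chars.findFrom st skw (start : Int) := Int.toNat_of_nonneg hidx
    constructor
    · rintro ⟨i, hsi, hil, hpre, hw⟩
      exact ⟨i, by omega, hil, hpre, hw⟩
    · rintro ⟨i, hsi, hil, hpre, hw⟩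
      by_cases hbig : (PySem.Chars.findFrom st skw (start : Int)).toNat + 1 ≤ i
      · exact ⟨i, hbig, hil, hpre, hw⟩
      · exfalso
        have hlt : i ≤ (PySem.Chars.findFrom st skw (start : Int)).toNat := by omega
        rcases lt_or_eq_of_le hlt with hlt | heq
        · exact hspec.2.2 i hsi hlt hpre
        · rw [← heq] at hcast
          rw [← hcast, hw] at hok'
          simp at hok'

-- a start index past the text yields find = -1 (CPython keeps this even for sub = '')
theorem findFrom_of_gt_length (st skw : List Char) (k : Nat) (h : st.length < k) :
    PySem.Chars.findFrom st skw (k : Int) = -1 := by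
  simp only [PySem.Chars.findFrom]
  split_ifs <;> omega

-- B's bounded find on one window: succeeds with idx ≤ hi iff some occurrence lies in [a, hi]
theorem window_find_iff (st skw : List Char) (a : Nat) (hi : Int) :
    ((PySem.Chars.findFrom st skw (a : Int) ≠ -1) ∧ PySem.Chars.findFrom st skw (a : Int) ≤ hi) ↔
      ∃ i : Nat, a ≤ i ∧ i ≤ st.length ∧ skw <+: st.drop i ∧ (i : Int) ≤ hi := by
  by_cases hk : a ≤ st.length
  · constructor
    · rintro ⟨hne, hle⟩
      have hb := pv_findFrom_bounds st skw a hne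
      have hidx : (0 : Int) ≤ PySem.Chars.findFrom st skw (a : Int) := le_trans (by positivity) hb.1
      have hspec := PySem.Chars.findFrom_natCast_spec st skw a hk hne
      have hcast : (((PySem.Chars.findFrom st skw (a : Int)).toNat : Nat) : Int)
          = PySem.Chars.findFrom st skw (a : Int) := Int.toNat_of_nonneg hidx
      exact ⟨(PySem.Chars.findFrom st skw (a : Int)).toNat, by omega, hb.2, hspec.2.1, by omega⟩
    · rintro ⟨i, hai, hil, hpre, hihi⟩
      have hne : PySem.Chars.findFrom st skw (a : Int) ≠ -1 := by
        rw [Ne, PySem.Chars.findFrom_natCast_eq_neg_one_iff st skw a hk]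
        intro hno
        apply hno
        have hdr : st.drop i = (st.drop a).drop (i - a) := by
          rw [List.drop_drop]; congr 1; omega
        rw [hdr] at hpre
        exact hpre.isInfix.trans (List.drop_suffix _ _).isInfix
      refine ⟨hne, ?_⟩
      have hb := pv_findFrom_bounds st skw a hne
      have hidx : (0 : Int) ≤ PySem.Chars.findFrom st skw (a : Int) := le_trans (by positivity) hb.1
      have hspec := PySem.Chars.findFrom_natCast_spec st skw a hk hne
      have hcast : (((PySem.Chars.findFrom st skw (a : Int)).toNat : Nat) : Int)
          = PySem.Chars.findFrom st skw (a : Int) := Int.toNat_of_nonneg hidx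
      by_cases hle : (PySem.Chars.findFrom st skw (a : Int)).toNat ≤ i
      · omega
      · exact absurd hpre (hspec.2.2 i hai (by omega))
  · constructor
    · rintro ⟨hne, _⟩
      exact absurd (findFrom_of_gt_length st skw a (by omega)) hne
    · rintro ⟨i, hai, hil, _, _⟩
      omega

-- the merge loop preserves, pointwise for every shift m and point x, membership of x in the
-- union of the shifted windows [w.1 - m, w.2]
theorem mergeFold_union (m : Nat) (x : Int) :
    ∀ (ws : List (Int × Int)) (acc : List (Int × Int)) (cur : Int × Int),
      (∀ w ∈ ws, cur.1 ≤ w.1) → ws.Pairwise (fun a b => a.1 ≤ b.1) →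
      ((∃ w ∈ pvMergeFin (ws.foldl pvMergeStep (acc, some cur)),
          w.1 - (m : Int) ≤ x ∧ x ≤ w.2) ↔
       (∃ w ∈ acc ++ cur :: ws, w.1 - (m : Int) ≤ x ∧ x ≤ w.2)) := by
  intro ws
  induction ws with
  | nil =>
    intro acc cur _ _
    simp [pvMergeFin]
  | cons w rest ih =>
    intro acc cur hlo hpw
    simp only [List.foldl_cons]
    have hpw' : rest.Pairwise (fun a b => a.1 ≤ b.1) := (List.pairwise_cons.mp hpw).2
    have hwrest : ∀ v ∈ rest, w.1 ≤ v.1 := (List.pairwise_cons.mp hpw).1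
    have hcw : cur.1 ≤ w.1 := hlo w (List.mem_cons_self ..)
    by_cases hov : w.1 ≤ cur.2
    · have hstep : pvMergeStep (acc, some cur) w = (acc, some (cur.1, max cur.2 w.2)) := by
        simp [pvMergeStep, hov]
      rw [hstep]
      rw [ih acc (cur.1, max cur.2 w.2) (fun v hv => le_trans hcw (hwrest v hv)) hpw']
      simp only [List.mem_append, List.mem_cons]
      constructor
      · rintro ⟨v, hv, h1, h2⟩
        rcases hv with hv | hv | hv
        · exact ⟨v, Or.inl hv, h1, h2⟩
        · rw [hv] at h1 h2
          have h1' : cur.1 - (m : Int) ≤ x := h1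
          have h2' : x ≤ max cur.2 w.2 := h2
          rw [le_max_iff] at h2'
          by_cases hx : x ≤ cur.2
          · exact ⟨cur, Or.inr (Or.inl rfl), h1', hx⟩
          · rcases h2' with h2' | h2'
            · exact absurd h2' hx
            · refine ⟨w, Or.inr (Or.inr (Or.inl rfl)), ?_, h2'⟩
              omega
        · exact ⟨v, Or.inr (Or.inr (Or.inr hv)), h1, h2⟩
      · rintro ⟨v, hv, h1, h2⟩
        rcases hv with hv | hv | hv | hv
        · exact ⟨v, Or.inl hv, h1, h2⟩
        · rw [hv] at h1 h2
          exact ⟨(cur.1, max cur.2 w.2), Or.inr (Or.inl rfl), h1,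
            le_trans h2 (le_max_left _ _)⟩
        · rw [hv] at h1 h2
          refine ⟨(cur.1, max cur.2 w.2), Or.inr (Or.inl rfl), ?_,
            le_trans h2 (le_max_right _ _)⟩
          show cur.1 - (m : Int) ≤ x
          omega
        · exact ⟨v, Or.inr (Or.inr hv), h1, h2⟩
    · have hstep : pvMergeStep (acc, some cur) w = (acc ++ [cur], some w) := by
        simp [pvMergeStep, hov]
      rw [hstep]
      rw [ih (acc ++ [cur]) w hwrest hpw']
      simp [List.mem_append, List.mem_cons]

-- union over the merged windows = union over the raw expanded windows
theorem merged_union_iff (pps : List (Int × Int)) (prox : Int) (m : Nat) (x : Int) :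
    (∃ w ∈ pvMergedWindows pps prox, w.1 - (m : Int) ≤ x ∧ x ≤ w.2) ↔
      (∃ p ∈ pps, (p.1 - prox) - (m : Int) ≤ x ∧ x ≤ p.2 + prox) := by
  have hsw := PySem.List.sorted_pairwise
    (pps.map (fun p => (p.1 - prox, p.2 + prox))) (fun w => w.1)
  have hperm := PySem.List.sorted_perm
    (pps.map (fun p => (p.1 - prox, p.2 + prox))) (fun w => w.1) false
  unfold pvMergedWindows
  generalize hsort : PySem.List.sorted
    (pps.map (fun p => (p.1 - prox, p.2 + prox))) (fun w => w.1) false = ws at hsw hperm ⊢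
  cases ws with
  | nil =>
    have hpps : pps = [] := List.map_eq_nil_iff.mp ((List.Perm.nil_eq hperm).symm)
    subst hpps
    simp [pvMergeFin]
  | cons w0 rest =>
    simp only [List.foldl_cons]
    have hstep0 : pvMergeStep (([] : List (Int × Int)), (none : Option (Int × Int))) w0
        = ([], some w0) := rfl
    rw [hstep0, mergeFold_union m x rest [] w0
      (List.pairwise_cons.mp hsw).1 (List.pairwise_cons.mp hsw).2]
    simp only [List.nil_append]
    constructor
    · rintro ⟨w, hw, h1, h2⟩
      have hv : w ∈ pps.map (fun p => (p.1 - prox, p.2 + prox)) := hperm.mem_iff.mp hw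
      obtain ⟨p, hp, hpe⟩ := List.mem_map.mp hv
      rw [← hpe] at h1 h2
      exact ⟨p, hp, h1, h2⟩
    · rintro ⟨p, hp, h1, h2⟩
      have hv : (p.1 - prox, p.2 + prox) ∈ w0 :: rest :=
        hperm.mem_iff.mpr (List.mem_map_of_mem hp)
      exact ⟨_, hv, h1, h2⟩

-- B's per-keyword test equals A's find loop
theorem found_eq (st skw : List Char) (pps : List (Int × Int)) (prox : Int) :
    (if prox ≤ 0 then PySem.Chars.isIn skw st
     else (if prox > 0 then pvMergedWindows pps prox else []).any (fun w =>
       let idx := PySem.Chars.findFrom st skw (max (w.1 - (skw.length : Int)) 0)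
       decide (idx ≠ -1) && decide (idx ≤ w.2)))
    = aFindLoop st skw pps prox 0 := by
  by_cases hp : prox ≤ 0
  · simp only [hp, if_true]
    apply bool_eq_of_iff
    rw [aFindLoop_iff]
    constructor
    · intro hin
      obtain ⟨j, hj⟩ := (PySem.Chars.exists_prefix_drop_iff_isIn skw st).mpr hin
      by_cases hjl : j ≤ st.length
      · exact ⟨j, Nat.zero_le _, hjl, hj, by simp [is_within_proximity_py, hp]⟩
      · have : st.drop j = [] := List.drop_eq_nil_of_le (by omega)
        rw [this] at hj
        have : skw = [] := List.prefix_nil.mp hj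
        exact ⟨st.length, Nat.zero_le _, le_refl _, by simp [this],
          by simp [is_within_proximity_py, hp]⟩
    · rintro ⟨i, _, _, hpre, _⟩
      exact (PySem.Chars.exists_prefix_drop_iff_isIn skw st).mp ⟨i, hpre⟩
  · simp only [hp, if_false, gt_iff_lt, show (0 : Int) < prox by omega, if_true]
    apply bool_eq_of_iff
    rw [aFindLoop_iff, List.any_eq_true]
    constructor
    · rintro ⟨w, hw, hf⟩
      simp only [Bool.and_eq_true, decide_eq_true_iff] at hf
      have ha : (0 : Int) ≤ max (w.1 - (skw.length : Int)) 0 := le_max_right _ _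
      have hcast : ((max (w.1 - (skw.length : Int)) 0).toNat : Int)
          = max (w.1 - (skw.length : Int)) 0 := Int.toNat_of_nonneg ha
      rw [← hcast] at hf
      obtain ⟨i, hai, hil, hpre, hihi⟩ := (window_find_iff st skw _ w.2).mp hf
      refine ⟨i, Nat.zero_le _, hil, hpre, ?_⟩
      rw [iwp_eq_window _ _ _ _ hp]
      have hx : w.1 - (skw.length : Int) ≤ (i : Int) := by omega
      exact (merged_union_iff pps prox skw.length i).mp ⟨w, hw, hx, hihi⟩
    · rintro ⟨i, _, hil, hpre, hiw⟩
      rw [iwp_eq_window _ _ _ _ hp] at hiw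
      obtain ⟨w, hw, h1, h2⟩ := (merged_union_iff pps prox skw.length i).mpr hiw
      refine ⟨w, hw, ?_⟩
      simp only [Bool.and_eq_true, decide_eq_true_iff]
      have ha : (0 : Int) ≤ max (w.1 - (skw.length : Int)) 0 := le_max_right _ _
      have hcast : ((max (w.1 - (skw.length : Int)) 0).toNat : Int)
          = max (w.1 - (skw.length : Int)) 0 := Int.toNat_of_nonneg ha
      rw [← hcast]
      apply (window_find_iff st skw _ w.2).mpr
      exact ⟨i, by omega, hil, hpre, h2⟩

-- the two per-keyword step shapes agree for any found-predicate
theorem step_comm (found : String → Bool) (kws acc : List String) :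
    kws.foldl (fun acc kw =>
      if found kw then (if acc.contains kw then acc else acc ++ [kw]) else acc) acc
    = kws.foldl (fun acc kw =>
      if acc.contains kw then acc else (if found kw then acc ++ [kw] else acc)) acc := by
  induction kws generalizing acc with
  | nil => rfl
  | cons kw rest ih =>
    simp only [List.foldl_cons]
    have hstep : (if found kw then (if acc.contains kw then acc else acc ++ [kw]) else acc)
        = (if acc.contains kw then acc else (if found kw then acc ++ [kw] else acc)) := by
      cases h1 : found kw <;> cases h2 : acc.contains kw <;> simp
    rw [hstep]
    exact ih _

-- fold the two per-keyword steps in lockstep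
theorem fold_eq (st : List Char) (cs : Bool) (pps : List (Int × Int)) (prox : Int)
    (kws : List String) (acc : List String) :
    kws.foldl (fun acc kw =>
      let skw := (if cs then kw else PySem.Str.lower kw).toList
      if aFindLoop st skw pps prox 0 then
        if acc.contains kw then acc else acc ++ [kw]
      else acc) acc
    = kws.foldl (fun acc kw =>
      if acc.contains kw then acc
      else
        let skw := (if cs then kw else PySem.Str.lower kw).toList
        if prox ≤ 0 then
          if PySem.Chars.isIn skw st then acc ++ [kw] else acc
        else
          let m := skw.length
          if ((if prox > 0 then pvMergedWindows pps prox else []).any (fun w =>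
               let idx := PySem.Chars.findFrom st skw (max (w.1 - (m : Int)) 0)
               decide (idx ≠ -1) && decide (idx ≤ w.2)))
          then acc ++ [kw] else acc) acc := by
  refine Eq.trans (step_comm
    (fun kw => aFindLoop st ((if cs then kw else PySem.Str.lower kw).toList) pps prox 0) kws acc) ?_
  congr 1
  funext a k
  by_cases hcont : k ∈ a
  · simp [hcont]
  · have hc : a.contains k = false := by simpa using hcont
    simp only [hc, Bool.false_eq_true, if_false]
    rw [← found_eq st ((if cs then k else PySem.Str.lower k).toList) pps prox]
    by_cases hp : prox ≤ 0
    · simp only [if_pos hp]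
    · simp only [if_neg hp]

-- ===== VERDICT (by name: the statement is the Claim_ definition above) =====
theorem evidence_keyword_check_py_spec : Claim_equal_evidence_keyword_check_py := by
  intro keywords case_sensitive text primary_positions proximity _
  unfold Spec_evidence_keyword_check_py
  unfold evidence_keyword_check_py evidence_keyword_check_py_alt
  by_cases hempty : keywords = [] ∨ text = ""
  · simp [hempty]
  · simp only [hempty, if_false]
    rw [fold_eq]
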